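-- pv_equiv track=rewrite | github.com/rhasepy/Metaheuristic-Works | VehicleRoutingProblem-GA-and-VNS/Source/VRP_GA.py | decodeGenotype
-- ===== SOURCE A (Python) =====
-- def decodeGenotype(encodedGenes, maxSize):
--
--     decodedGeno = []
--     subGeno = []
--     for i in range(len(encodedGenes)):
--
--         if (i % maxSize == 0 and i != 0):
--             decodedGeno.append(subGeno.copy())
--             subGeno = []
--
--         if (encodedGenes[i] == '1'):
--             subGeno.append(i % maxSize)
--
--     decodedGeno.append(subGeno.copy())
--     return decodedGeno
-- ===== SOURCE B (Python) =====
-- def decodeGenotype(encodedGenes, maxSize):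
--     head = [i for i, g in enumerate(encodedGenes[:maxSize]) if g == '1']
--     rest = encodedGenes[maxSize:]
--     if not rest:
--         return [head]
--     return [head] + decodeGenotype(rest, maxSize)
-- ===== Notes on version B (the rewrite author's own statement) =====
-- stated objective: simpler
-- what changed: Replaces A's flat index loop with modulo boundary tests and two mutable accumulators by a recursive decomposition: decode the first maxSize-slice via enumerate and recurse on the remainder; Pre_ excludes nonempty input with maxSize <= 0, where A raises ZeroDivisionError (maxSize == 0) or returns negative divisor-signed chunk indices (an artefact of Python's '%') while B's recursion does not terminate there.
-- outside the precondition, e.g. on decodeGenotype(['1', '0', '1'], -3): A returns [[0, -1]], B does not finish within the time limit; on decodeGenotype(['1'], 0): A raises ZeroDivisionError, B does not finish within the time limit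
import Mathlib
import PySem

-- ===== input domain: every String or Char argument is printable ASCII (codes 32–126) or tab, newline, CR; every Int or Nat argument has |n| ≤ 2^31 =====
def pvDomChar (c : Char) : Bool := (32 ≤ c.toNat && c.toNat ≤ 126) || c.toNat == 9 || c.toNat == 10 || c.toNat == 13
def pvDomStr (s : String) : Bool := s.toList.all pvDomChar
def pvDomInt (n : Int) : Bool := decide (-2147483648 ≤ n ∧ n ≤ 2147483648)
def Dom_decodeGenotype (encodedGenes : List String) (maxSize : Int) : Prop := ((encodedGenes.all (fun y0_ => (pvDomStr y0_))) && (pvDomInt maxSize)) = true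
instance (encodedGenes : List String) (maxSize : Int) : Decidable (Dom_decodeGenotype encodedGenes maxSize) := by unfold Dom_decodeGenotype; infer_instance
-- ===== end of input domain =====

-- B replaces A's flat modulo-driven index loop by a recursive chunk decomposition (slice + enumerate); objective: simpler.


-- ===== PORT A =====
def decodeGenotype (encodedGenes : List String) (maxSize : Int) : List (List Int) :=
  let r := (PySem.List.pyRange 0 (encodedGenes.length : Int) 1).foldl
    (fun (st : List (List Int) × List Int) i =>
      let st := if PySem.Int.mod i maxSize = 0 ∧ i ≠ 0 then (st.1 ++ [st.2], ([] : List Int)) else st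
      if PySem.List.pyGetD encodedGenes i "" = "1" then (st.1, st.2 ++ [PySem.Int.mod i maxSize]) else st)
    ([], [])
  r.1 ++ [r.2]

-- ===== PORT B =====
-- fuel = one unit per produced chunk; encodedGenes.length + 1 suffices on Pre_ (each recursive call drops ≥ 1 element)
def decodeChunks (fuel : Nat) (genes : List String) (maxSize : Int) : List (List Int) :=
  match fuel with
  | 0 => []
  | Nat.succ f =>
    let head := (PySem.List.enumerate (PySem.List.slice genes none (some maxSize))).filterMap
      (fun p => if p.2 = "1" then some p.1 else none)
    let rest := PySem.List.slice genes (some maxSize) none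
    if rest.isEmpty then [head]
    else head :: decodeChunks f rest maxSize

def decodeGenotype_alt (encodedGenes : List String) (maxSize : Int) : List (List Int) :=
  decodeChunks (encodedGenes.length + 1) encodedGenes maxSize

-- ===== PRECONDITION & SPEC =====
-- Pre_ excludes nonempty input with maxSize ≤ 0: there A raises ZeroDivisionError (maxSize = 0) or returns
-- negative divisor-signed chunk indices (an artefact of Python's '%'), while B's recursion does not terminate.
def Pre_decodeGenotype (encodedGenes : List String) (maxSize : Int) : Prop :=
  encodedGenes = [] ∨ 1 ≤ maxSize
instance (encodedGenes : List String) (maxSize : Int) : Decidable (Pre_decodeGenotype encodedGenes maxSize) := by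
  unfold Pre_decodeGenotype; infer_instance

def pvWitness_decodeGenotype : List String × Int := (["1", "0", "1", "1", "0"], 2)

def Spec_decodeGenotype (encodedGenes : List String) (maxSize : Int) (out : List (List Int)) : Prop := out = decodeGenotype_alt encodedGenes maxSize
instance (encodedGenes : List String) (maxSize : Int) (out : List (List Int)) : Decidable (Spec_decodeGenotype encodedGenes maxSize out) := by unfold Spec_decodeGenotype; infer_instance

-- ===== CLAIM (what is proved, stated in full; the proofs are below) =====
def Claim_equal_decodeGenotype : Prop := ∀ (encodedGenes : List String) (maxSize : Int), Dom_decodeGenotype encodedGenes maxSize → Pre_decodeGenotype encodedGenes maxSize → Spec_decodeGenotype encodedGenes maxSize (decodeGenotype encodedGenes maxSize)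

-- ===== LEMMAS AND PROOFS =====

-- A's loop body, named for the proofs (definitionally the lambda in decodeGenotype)
def fA (genes : List String) (k : Int) (st : List (List Int) × List Int) (i : Int) : List (List Int) × List Int :=
  let st := if PySem.Int.mod i k = 0 ∧ i ≠ 0 then (st.1 ++ [st.2], ([] : List Int)) else st
  if PySem.List.pyGetD genes i "" = "1" then (st.1, st.2 ++ [PySem.Int.mod i k]) else st

-- B's chunk body, named for the proofs (definitionally the head expression in decodeChunks)
def collectF (xs : List String) : List Int :=
  (PySem.List.enumerate xs).filterMap (fun p => if p.2 = "1" then some p.1 else none)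

theorem collectF_snoc (xs : List String) (y : String) :
    collectF (xs ++ [y]) = collectF xs ++ (if y = "1" then [(xs.length : Int)] else []) := by
  simp [collectF, PySem.List.enumerate_append, PySem.List.enumerate_cons]
  split <;> simp_all

theorem mod_small (k : Int) (m : Nat) (h : (m : Int) < k) : PySem.Int.mod (m : Int) k = m := by
  rw [PySem.Int.mod_eq_emod_of_pos (by omega : (0:Int) < k)]
  exact Int.emod_eq_of_lt (by omega) h

-- first phase of A's loop: below index k there is never a split, positions accumulate in st.2
theorem collect_phase (genes : List String) (k : Int) :
    ∀ (m : Nat), (m : Int) ≤ k → m ≤ genes.length → ∀ (s : List Int),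
      (PySem.List.pyRange 0 (m : Int) 1).foldl (fA genes k) ([], s)
        = ([], s ++ collectF (genes.take m)) := by
  intro m
  induction m with
  | zero => intro _ _ s; simp [collectF]
  | succ m ih =>
    intro hmk hml s
    have h1 : ((m + 1 : Nat) : Int) = (m : Int) + 1 := by push_cast; ring
    rw [h1, PySem.List.pyRange_one_succ_right (by omega : (0:Int) ≤ (m:Int)), List.foldl_append,
        ih (by omega) (by omega) s]
    have hml' : m < genes.length := by omega
    have hget : PySem.List.pyGetD genes (m : Int) "" = genes[m] := by
      rw [PySem.List.pyGetD_natCast, List.getD_eq_getElem?_getD, List.getElem?_eq_getElem hml']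
      rfl
    have htake : genes.take (m + 1) = genes.take m ++ [genes[m]] := by
      rw [← List.take_concat_get, List.concat_eq_append]
    have hlen : (genes.take m).length = m := by simp; omega
    simp only [List.foldl_cons, List.foldl_nil, fA, hget, htake, collectF_snoc, hlen,
      mod_small k m (by omega)]
    have hf : ¬((m:Int) = 0 ∧ (m:Int) ≠ 0) := fun h => h.2 h.1
    simp only [if_neg hf]
    split <;> simp

theorem mod_shift (k x : Int) (hk : 0 < k) : PySem.Int.mod (k + x) k = PySem.Int.mod x k := by
  rw [PySem.Int.mod_eq_emod_of_pos hk, PySem.Int.mod_eq_emod_of_pos hk,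
      show k + x = x + k * 1 by ring, Int.add_mul_emod_self_left]

theorem getD_shift (genes : List String) (K j : Nat) :
    PySem.List.pyGetD genes ((K : Int) + (j : Int)) "" = PySem.List.pyGetD (genes.drop K) (j : Int) "" := by
  rw [show (K : Int) + (j : Int) = ((K + j : Nat) : Int) by push_cast; ring,
      PySem.List.pyGetD_natCast, PySem.List.pyGetD_natCast]
  simp [List.getD_eq_getElem?_getD, List.getElem?_drop]

-- one step of A's loop at index k + j is one step of A's loop on the dropped list at index j
theorem step_shift (genes : List String) (k : Int) (hk : 1 ≤ k) (j : Nat) (hj : 1 ≤ j)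
    (p : List (List Int)) (st : List (List Int) × List Int) :
    fA genes k (p ++ st.1, st.2) (k + (j : Int))
      = (p ++ (fA (genes.drop k.toNat) k st (j : Int)).1, (fA (genes.drop k.toNat) k st (j : Int)).2) := by
  have hkK : ((k.toNat : Nat) : Int) = k := Int.toNat_of_nonneg (by omega)
  have hget : PySem.List.pyGetD genes (k + (j : Int)) "" = PySem.List.pyGetD (genes.drop k.toNat) (j : Int) "" := by
    rw [← hkK]; exact getD_shift genes k.toNat j
  have hmod : PySem.Int.mod (k + (j : Int)) k = PySem.Int.mod (j : Int) k := mod_shift k j (by omega)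
  have hne1 : (k + (j : Int)) ≠ 0 := by omega
  have hne2 : ((j : Int)) ≠ 0 := by omega
  simp only [fA, hmod, hget, hne1, hne2, ne_eq, not_false_iff, and_true]
  by_cases h1 : PySem.Int.mod (j : Int) k = 0 <;> simp [h1] <;> split <;> simp

-- second phase of A's loop, shifted by k, with a prepended prefix that the loop only carries along
theorem shift_phase (genes : List String) (k : Int) (hk : 1 ≤ k) :
    ∀ (m a : Nat), 1 ≤ a → ∀ (p q : List (List Int)) (s : List Int),
      (PySem.List.pyRange (k + (a : Int)) (k + (a : Int) + (m : Int)) 1).foldl (fA genes k) (p ++ q, s)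
        = (p ++ ((PySem.List.pyRange (a : Int) ((a : Int) + (m : Int)) 1).foldl (fA (genes.drop k.toNat) k) (q, s)).1,
           ((PySem.List.pyRange (a : Int) ((a : Int) + (m : Int)) 1).foldl (fA (genes.drop k.toNat) k) (q, s)).2) := by
  intro m
  induction m with
  | zero => intro a ha p q s; simp
  | succ m ih =>
    intro a ha p q s
    have e1 : k + (a : Int) + ((m + 1 : Nat) : Int) = (k + (a : Int) + (m : Int)) + 1 := by push_cast; ring
    have e2 : (a : Int) + ((m + 1 : Nat) : Int) = ((a : Int) + (m : Int)) + 1 := by push_cast; ring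
    rw [e1, e2, PySem.List.pyRange_one_succ_right (by omega), PySem.List.pyRange_one_succ_right (by omega),
        List.foldl_append, List.foldl_append, ih a ha p q s]
    have e3 : k + (a : Int) + (m : Int) = k + ((a + m : Nat) : Int) := by push_cast; ring
    have e4 : (a : Int) + (m : Int) = ((a + m : Nat) : Int) := by push_cast; ring
    rw [List.foldl_cons, List.foldl_nil, List.foldl_cons, List.foldl_nil, e3, e4]
    exact step_shift genes k hk (a + m) (by omega) p _

theorem A_as_fold (genes : List String) (k : Int) :
    decodeGenotype genes k
      = (((PySem.List.pyRange 0 (genes.length : Int) 1).foldl (fA genes k) ([], [])).1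
         ++ [((PySem.List.pyRange 0 (genes.length : Int) 1).foldl (fA genes k) ([], [])).2]) := rfl

-- A peels its first chunk: one split at index k, then the loop on the dropped list
theorem peel (genes : List String) (k : Int) (hk : 1 ≤ k) (hlt : k.toNat < genes.length) :
    decodeGenotype genes k = collectF (genes.take k.toNat) :: decodeGenotype (genes.drop k.toNat) k := by
  have hkK : ((k.toNat : Nat) : Int) = k := Int.toNat_of_nonneg (by omega)
  set K := k.toNat with hK
  set n := genes.length with hn
  have hKn : K < n := hlt
  rw [A_as_fold, A_as_fold]
  have hlen' : ((genes.drop K).length : Int) = ((n - K : Nat) : Int) := by simp [hn]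
  rw [hlen']
  have hsplit : PySem.List.pyRange 0 (n : Int) 1
      = PySem.List.pyRange 0 (K : Int) 1 ++ PySem.List.pyRange (K : Int) (n : Int) 1 :=
    PySem.List.pyRange_one_append 0 (K : Int) (n : Int) (by omega) (by omega)
  rw [hsplit, List.foldl_append, collect_phase genes k K (by omega) (by omega) []]
  simp only [List.nil_append]
  rw [PySem.List.pyRange_one_cons (a := (K : Int)) (b := (n : Int)) (by omega),
      PySem.List.pyRange_one_cons (a := (0 : Int)) (b := ((n - K : Nat) : Int)) (by omega),
      List.foldl_cons, List.foldl_cons]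
  have hmodK : PySem.Int.mod (K : Int) k = 0 := by
    rw [hkK, PySem.Int.mod_eq_emod_of_pos (by omega : (0:Int) < k), Int.emod_self]
  have hmod0 : PySem.Int.mod (0 : Int) k = 0 := by
    rw [PySem.Int.mod_eq_emod_of_pos (by omega : (0:Int) < k)]; simp
  have hget0 : PySem.List.pyGetD genes (K : Int) "" = PySem.List.pyGetD (genes.drop K) (0 : Int) "" := by
    have := getD_shift genes K 0
    simpa using this
  have hKne : ((K : Nat) : Int) ≠ 0 := by
    have : 1 ≤ K := by omega
    omega
  have hstep1 : fA genes k ([], collectF (genes.take K)) (K : Int)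
      = ([collectF (genes.take K)],
         if PySem.List.pyGetD (genes.drop K) (0 : Int) "" = "1" then [(0:Int)] else []) := by
    simp only [fA, hmodK, hKne, ne_eq, not_false_iff, and_true, if_true, hget0]
    split <;> simp
  have hstep2 : fA (genes.drop K) k ([], []) (0 : Int)
      = (([] : List (List Int)),
         if PySem.List.pyGetD (genes.drop K) (0 : Int) "" = "1" then [(0:Int)] else []) := by
    simp only [fA, hmod0]
    split <;> simp
  rw [hstep1, hstep2]
  set c := if PySem.List.pyGetD (genes.drop K) (0 : Int) "" = "1" then [(0:Int)] else [] with hc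
  have e1 : (K : Int) + 1 = k + ((1 : Nat) : Int) := by rw [hkK]; push_cast; ring
  have e2 : (n : Int) = k + ((1 : Nat) : Int) + ((n - K - 1 : Nat) : Int) := by
    rw [← hkK]; push_cast [Nat.cast_sub (by omega : 1 ≤ n - K), Nat.cast_sub (le_of_lt hKn)]; ring
  have e3 : ((n - K : Nat) : Int) = ((1 : Nat) : Int) + ((n - K - 1 : Nat) : Int) := by
    push_cast [Nat.cast_sub (by omega : 1 ≤ n - K), Nat.cast_sub (le_of_lt hKn)]; ring
  have hsh := shift_phase genes k hk (n - K - 1) 1 (by omega) [collectF (genes.take K)] [] c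
  rw [e1, e2, e3]
  simp only [List.append_nil] at hsh
  rw [hsh]
  simp only [List.cons_append, List.nil_append]
  exact rfl

theorem base_case (genes : List String) (k : Int) (hk : 1 ≤ k) (hle : genes.length ≤ k.toNat) :
    decodeGenotype genes k = [collectF genes] := by
  have hkK : ((k.toNat : Nat) : Int) = k := Int.toNat_of_nonneg (by omega)
  rw [A_as_fold, collect_phase genes k genes.length (by omega) (le_refl _) []]
  simp

theorem slice_nil_to (k : Int) : PySem.List.slice ([] : List String) none (some k) = [] := by
  simp [PySem.List.slice]

theorem slice_nil_from (k : Int) : PySem.List.slice ([] : List String) (some k) none = [] := by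
  simp [PySem.List.slice]

theorem chunks_nil (fuel : Nat) (k : Int) : decodeChunks (fuel + 1) ([] : List String) k = [[]] := by
  simp [decodeChunks, slice_nil_to, slice_nil_from]

theorem A_nil (k : Int) : decodeGenotype ([] : List String) k = [[]] := by
  rw [A_as_fold]; simp

theorem main_ind (k : Int) (hk : 1 ≤ k) :
    ∀ (n : Nat) (genes : List String) (fuel : Nat), genes.length ≤ n → genes.length < fuel →
      decodeGenotype genes k = decodeChunks fuel genes k := by
  intro n
  induction n with
  | zero =>
    intro genes fuel h1 h2
    have hg : genes = [] := List.eq_nil_of_length_eq_zero (by omega)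
    subst hg
    cases fuel with
    | zero => omega
    | succ f => rw [A_nil, chunks_nil]
  | succ n ih =>
    intro genes fuel h1 h2
    cases fuel with
    | zero => omega
    | succ f =>
      have h0k : (0 : Int) ≤ k := by omega
      by_cases hle : genes.length ≤ k.toNat
      · have hrest : PySem.List.slice genes (some k) none = [] := by
          rw [PySem.List.slice_from genes h0k]
          exact List.drop_eq_nil_of_le hle
        have hhead : PySem.List.slice genes none (some k) = genes := by
          rw [PySem.List.slice_to genes h0k]
          exact List.take_of_length_le hle
        rw [base_case genes k hk hle]
        simp [decodeChunks, hrest, hhead, collectF]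
      · have hlt : k.toNat < genes.length := by omega
        have hrest : PySem.List.slice genes (some k) none = genes.drop k.toNat := PySem.List.slice_from genes h0k
        have hhead : PySem.List.slice genes none (some k) = genes.take k.toNat := PySem.List.slice_to genes h0k
        have hne : ¬ (genes.drop k.toNat).isEmpty = true := by
          simp [List.isEmpty_iff, List.drop_eq_nil_iff]; omega
        rw [peel genes k hk hlt]
        simp only [decodeChunks, hrest, hhead, hne, if_false, Bool.false_eq_true]
        have hK1 : 1 ≤ k.toNat := by omega
        rw [ih (genes.drop k.toNat) f (by simp; omega) (by simp; omega)]
        rfl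

-- ===== VERDICT (by name: the statement is the Claim_ definition above) =====
theorem decodeGenotype_spec : Claim_equal_decodeGenotype := by
  intro genes k _ hpre
  unfold Spec_decodeGenotype decodeGenotype_alt
  rcases hpre with h | h
  · subst h
    rw [A_nil]
    exact (chunks_nil 0 k).symm
  · exact main_ind k h genes.length genes (genes.length + 1) le_rfl (by omega)
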